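-- pv_equiv track=rewrite | github.com/netra-systems/zen | auth_service/auth_core/api/websocket_auth.py | _is_jwt_like_token
-- ===== SOURCE A (Python) =====
-- def _is_jwt_like_token(token_candidate: str) -> bool:
--     """
--     Check if a string looks like a JWT token
--
--     JWT tokens have 3 parts separated by dots and use base64url encoding.
--     """
--     if not token_candidate or not isinstance(token_candidate, str):
--         return False
--
--     # Basic JWT structure check
--     parts = token_candidate.split(".")
--     if len(parts) != 3:
--         return False
--
--     # Check that parts are not empty and contain base64url-like characters
--     for part in parts:
--         if not part:
--             return False
--         # Base64url characters: A-Z, a-z, 0-9, -, _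
--         if not all(c.isalnum() or c in "-_" for c in part):
--             return False
--
--     # Additional length check (JWT tokens are typically 100+ characters)
--     if len(token_candidate) < 50:
--         return False
--
--     return True
-- ===== SOURCE B (Python) =====
-- def _is_jwt_like_token(token_candidate: str) -> bool:
--     """Single-pass DFA: scan once, tracking dot count and whether the
--     current dot-separated segment is still empty."""
--     if not isinstance(token_candidate, str) or len(token_candidate) < 50:
--         return False
--     dots = 0
--     seg_empty = True
--     for c in token_candidate:
--         if c == '.':
--             if seg_empty:
--                 return False
--             dots += 1
--             seg_empty = True
--         elif c.isalnum() or c in '-_':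
--             seg_empty = False
--         else:
--             return False
--     return dots == 2 and not seg_empty
-- ===== Notes on version B (the rewrite author's own statement) =====
-- stated objective: alternative
-- what changed: Replaced the split-then-nested-validation-loops with a single-pass character automaton tracking the dot count and whether the current segment is empty, with the length guard hoisted to the front.
import Mathlib
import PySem

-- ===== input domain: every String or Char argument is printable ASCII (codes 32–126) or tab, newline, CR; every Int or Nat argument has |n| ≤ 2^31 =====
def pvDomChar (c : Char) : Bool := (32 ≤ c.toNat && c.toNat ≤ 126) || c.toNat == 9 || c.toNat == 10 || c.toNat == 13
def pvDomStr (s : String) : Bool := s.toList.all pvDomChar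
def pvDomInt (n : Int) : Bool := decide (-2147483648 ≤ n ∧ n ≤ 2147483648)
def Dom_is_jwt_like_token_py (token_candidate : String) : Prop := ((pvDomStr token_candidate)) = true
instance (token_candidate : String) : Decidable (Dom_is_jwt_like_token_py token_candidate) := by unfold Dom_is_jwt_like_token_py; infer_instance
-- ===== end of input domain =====

-- B replaces A's split('.')-plus-nested-validation-loops by a single-pass character
-- automaton (dot count + "current segment empty" flag); an alternative of the same cost.

-- ===== PORT A =====
-- 'c.isalnum() or c in "-_"' (exact on the ASCII domain)
def jwtCharA (c : Char) : Bool := PySem.Chars.isalnum c || (c == '-' || c == '_')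

def is_jwt_like_token_py (token_candidate : String) : Bool :=
  let l := token_candidate.toList
  -- 'if not token_candidate or not isinstance(token_candidate, str)' (isinstance is always true here)
  if l.isEmpty then false
  else
    let parts := PySem.Chars.splitOn l ['.']
    if ¬ parts.length = 3 then false
    else
      -- 'for part in parts: if not part: return False; if not all(...): return False'
      if ¬ (parts.all fun part => !part.isEmpty && part.all jwtCharA) then false
      else if PySem.Chars.len l < 50 then false
      else true

-- ===== PORT B =====
-- the scan loop of Source B: state = (dots so far, current segment still empty)
def jwtScanB : List Char → Nat → Bool → Bool
  | [], dots, segEmpty => dots == 2 && !segEmpty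
  | c :: cs, dots, segEmpty =>
    if c == '.' then
      if segEmpty then false else jwtScanB cs (dots + 1) true
    else if PySem.Chars.isalnum c || (c == '-' || c == '_') then
      jwtScanB cs dots false
    else false

def is_jwt_like_token_py_alt (token_candidate : String) : Bool :=
  if PySem.Chars.len token_candidate.toList < 50 then false
  else jwtScanB token_candidate.toList 0 true

-- ===== PRECONDITION & SPEC =====
def Spec_is_jwt_like_token_py (token_candidate : String) (out : Bool) : Prop := out = is_jwt_like_token_py_alt token_candidate
instance (token_candidate : String) (out : Bool) : Decidable (Spec_is_jwt_like_token_py token_candidate out) := by unfold Spec_is_jwt_like_token_py; infer_instance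

-- ===== CLAIM (what is proved, stated in full; the proofs are below) =====
def Claim_equal_is_jwt_like_token_py : Prop := ∀ (token_candidate : String), Dom_is_jwt_like_token_py token_candidate → Spec_is_jwt_like_token_py token_candidate (is_jwt_like_token_py token_candidate)

-- ===== LEMMAS AND PROOFS =====

-- reference split on '.' carrying the current (reversed) segment
def dotSplit : List Char → List Char → List (List Char)
  | [], cur => [cur.reverse]
  | c :: cs, cur => if c = '.' then cur.reverse :: dotSplit cs [] else dotSplit cs (c :: cur)

theorem splitOn_go_eq (fuel : Nat) (l cur : List Char) (acc : List (List Char))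
    (h : l.length < fuel) :
    PySem.Chars.splitOn.go ['.'] fuel l cur acc = acc.reverse ++ dotSplit l cur := by
  induction fuel generalizing l cur acc with
  | zero => omega
  | succ n ih =>
    cases l with
    | nil => simp [PySem.Chars.splitOn.go, dotSplit]
    | cons c cs =>
      by_cases hc : c = '.'
      · subst hc
        rw [show PySem.Chars.splitOn.go ['.'] (n+1) ('.' :: cs) cur acc
              = PySem.Chars.splitOn.go ['.'] n cs [] (cur.reverse :: acc) by
            simp [PySem.Chars.splitOn.go, List.isPrefixOf]]
        rw [ih cs [] (cur.reverse :: acc) (by simpa using Nat.lt_of_succ_lt_succ h)]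
        simp [dotSplit]
      · rw [show PySem.Chars.splitOn.go ['.'] (n+1) (c :: cs) cur acc
              = PySem.Chars.splitOn.go ['.'] n cs (c :: cur) acc by
            simp only [PySem.Chars.splitOn.go, List.isPrefixOf, Bool.and_eq_true, beq_iff_eq]
            rw [if_neg (by intro hh; exact hc hh.1.symm)]]
        rw [ih cs (c :: cur) acc (by simpa using Nat.lt_of_succ_lt_succ h)]
        simp [dotSplit, hc]

theorem splitOn_eq_dotSplit (l : List Char) :
    PySem.Chars.splitOn l ['.'] = dotSplit l [] := by
  have := splitOn_go_eq (l.length + 1) l [] [] (by omega)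
  simpa [PySem.Chars.splitOn] using this

theorem dotSplit_head (l cur : List Char) :
    ∃ t rest, dotSplit l cur = (cur.reverse ++ t) :: rest := by
  induction l generalizing cur with
  | nil => exact ⟨[], [], by simp [dotSplit]⟩
  | cons c cs ih =>
    by_cases hc : c = '.'
    · exact ⟨[], dotSplit cs [], by simp [dotSplit, hc]⟩
    · obtain ⟨t, rest, ht⟩ := ih (c :: cur)
      exact ⟨c :: t, rest, by simp [dotSplit, hc, ht]⟩

-- the automaton equals A's per-part check on the split, for a word-only partial segment
theorem jwtScan_eq (l : List Char) (cur : List Char) (d : Nat)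
    (hcur : cur.all jwtCharA = true) :
    jwtScanB l d cur.isEmpty
      = (decide (d + (dotSplit l cur).length = 3)
          && (dotSplit l cur).all fun part => !part.isEmpty && part.all jwtCharA) := by
  induction l generalizing cur d with
  | nil =>
    cases cur with
    | nil => simp [jwtScanB, dotSplit]
    | cons x xs =>
      simp only [jwtScanB, dotSplit, List.isEmpty_cons, Bool.not_false, Bool.and_true,
        List.length_cons, List.length_nil, List.all_cons, List.all_nil]
      rw [show (!(x :: xs).reverse.isEmpty) = true by simp,
          show ((x :: xs).reverse.all jwtCharA) = true by rw [List.all_reverse]; exact hcur]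
      simp only [Bool.true_and, Bool.and_true]
      exact decide_eq_decide.mpr (by omega)
  | cons c cs ih =>
    by_cases hc : c = '.'
    · subst hc
      cases cur with
      | nil => simp [jwtScanB, dotSplit]
      | cons x xs =>
        have hIH := ih [] (d + 1) (by simp)
        simp only [List.isEmpty_nil] at hIH
        have hl : jwtScanB ('.' :: cs) d ((x :: xs).isEmpty) = jwtScanB cs (d + 1) true := by
          simp [jwtScanB]
        rw [hl, hIH]
        simp only [dotSplit, reduceIte, List.length_cons, List.all_cons]
        rw [show (!(x :: xs).reverse.isEmpty) = true by simp,
            show ((x :: xs).reverse.all jwtCharA) = true by rw [List.all_reverse]; exact hcur]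
        simp only [Bool.true_and]
        congr 1
        exact decide_eq_decide.mpr (by omega)
    · by_cases hw : jwtCharA c = true
      · have hIH := ih (c :: cur) d (by simp [List.all_cons, hcur]; simpa [jwtCharA] using hw)
        simp only [List.isEmpty_cons] at hIH
        have hl : jwtScanB (c :: cs) d cur.isEmpty = jwtScanB cs d false := by
          simp only [jwtScanB]
          rw [if_neg (by simp [hc]), if_pos (by simpa [jwtCharA] using hw)]
        rw [hl, hIH, show dotSplit (c :: cs) cur = dotSplit cs (c :: cur) by
          simp [dotSplit, hc]]
      · obtain ⟨t, rest, ht⟩ := dotSplit_head cs (c :: cur)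
        have hl : jwtScanB (c :: cs) d cur.isEmpty = false := by
          simp only [jwtScanB]
          rw [if_neg (by simp [hc]), if_neg (by simpa [jwtCharA] using hw)]
        rw [hl, show dotSplit (c :: cs) cur = ((c :: cur).reverse ++ t) :: rest by
          simp [dotSplit, hc, ht]]
        have hbad : (((c :: cur).reverse ++ t).all jwtCharA) = false := by
          rw [List.all_append, List.all_reverse, List.all_cons,
              show jwtCharA c = false from by simpa using hw]
          simp
        rw [List.all_cons, hbad]
        simp

-- ===== VERDICT (by name: the statement is the Claim_ definition above) =====
theorem is_jwt_like_token_py_spec : Claim_equal_is_jwt_like_token_py := by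
  intro t _
  unfold Spec_is_jwt_like_token_py is_jwt_like_token_py is_jwt_like_token_py_alt
  by_cases h50 : t.length < 50
  · simp [PySem.Chars.len_eq, h50]
  · have hne : ¬ t = "" := by intro h; subst h; simp at h50
    have hscan := jwtScan_eq t.toList [] 0 (by simp)
    simp only [List.isEmpty_nil, Nat.zero_add] at hscan
    simp [PySem.Chars.len_eq, h50, hne, splitOn_eq_dotSplit, hscan]
    congr 1
    by_cases hA : ∃ x ∈ dotSplit t.toList [], ¬x = [] → ∃ y ∈ x, jwtCharA y = false
    · rw [decide_eq_true hA]
      obtain ⟨x, hx, hb⟩ := hA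
      symm
      simp only [Bool.not_true]
      rw [List.all_eq_false]
      refine ⟨x, hx, ?_⟩
      by_cases hxe : x = []
      · subst hxe; simp
      · obtain ⟨y, hy, hyb⟩ := hb hxe
        simp only [Bool.and_eq_true, not_and, List.all_eq_true]
        intro _ hall
        exact absurd (hall y hy) (by simp [hyb])
    · rw [decide_eq_false hA]
      push Not at hA
      symm
      simp only [Bool.not_false]
      rw [List.all_eq_true]
      intro part hp
      obtain ⟨hne', hgood⟩ := hA part hp
      simp only [Bool.and_eq_true, List.all_eq_true]
      refine ⟨by simpa using hne', fun y hy => ?_⟩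
      simpa using hgood y hy
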